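-- pv_equiv track=rewrite | github.com/pngobiro/download_telegram_files | categorize_files.py | categorize_files_by_keywords
-- ===== SOURCE A (Python) =====
-- def categorize_files_by_keywords(metadata, categories):
--     """
--     Categorize files based on keyword mapping.
--
--     Args:
--         metadata: Dictionary of file metadata
--         categories: Dict of {category_name: [keywords]}
--
--     Returns:
--         Dict of {category_name: [files]}
--     """
--     categorized = {cat: [] for cat in categories.keys()}
--     categorized['uncategorized'] = []
--
--     for filename, data in metadata.items():
--         message_text = data.get('message_text', '').lower()
--         file_text = filename.lower()
--         combined_text = f"{message_text} {file_text}"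
--
--         matched = False
--         for category, keywords in categories.items():
--             for keyword in keywords:
--                 if keyword.lower() in combined_text:
--                     categorized[category].append({
--                         'filename': filename,
--                         **data
--                     })
--                     matched = True
--                     break
--             if matched:
--                 break
--
--         if not matched:
--             categorized['uncategorized'].append({
--                 'filename': filename,
--                 **data
--             })
--
--     return categorized
-- ===== SOURCE B (Python) =====
-- def categorize_files_by_keywords(metadata, categories):
--     """Category-major re-implementation: lower-case every keyword once per
--     category and sweep the still-unassigned files per category, instead of
--     re-lowering all keywords for every file."""
--     remaining = [(fn, data, f"{data.get('message_text', '').lower()} {fn.lower()}")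
--                  for fn, data in metadata.items()]
--     result = {}
--     for category, keywords in categories.items():
--         lowered = [k.lower() for k in keywords]
--         result[category] = [{'filename': fn, **data} for fn, data, text in remaining
--                             if any(k in text for k in lowered)]
--         remaining = [t for t in remaining if not any(k in t[2] for k in lowered)]
--     result['uncategorized'] = [{'filename': fn, **data} for fn, data, _ in remaining]
--     return result
-- ===== Notes on version B (the rewrite author's own statement) =====
-- stated objective: alternative
-- what changed: B inverts the loop nesting: instead of testing every keyword of every category per file, it sweeps the still-unassigned files once per category in category order, lower-casing each category's keywords once instead of once per file.
import Mathlib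
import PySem

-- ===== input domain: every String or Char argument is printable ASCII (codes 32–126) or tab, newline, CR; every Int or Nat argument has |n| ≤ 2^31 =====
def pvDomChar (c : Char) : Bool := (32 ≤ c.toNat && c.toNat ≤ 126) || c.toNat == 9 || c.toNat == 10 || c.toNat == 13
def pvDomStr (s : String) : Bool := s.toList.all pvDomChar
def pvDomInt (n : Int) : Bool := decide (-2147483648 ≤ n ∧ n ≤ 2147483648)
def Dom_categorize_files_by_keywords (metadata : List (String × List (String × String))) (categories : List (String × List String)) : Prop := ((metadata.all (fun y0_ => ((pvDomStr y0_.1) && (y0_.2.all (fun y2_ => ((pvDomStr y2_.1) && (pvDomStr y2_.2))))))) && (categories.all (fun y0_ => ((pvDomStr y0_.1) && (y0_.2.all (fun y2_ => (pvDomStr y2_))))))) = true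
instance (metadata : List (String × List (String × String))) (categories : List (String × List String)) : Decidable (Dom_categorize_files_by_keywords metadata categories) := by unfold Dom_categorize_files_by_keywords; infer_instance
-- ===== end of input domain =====

-- B re-implements the categorization category-major (sweep the still-unassigned files once per
-- category, keywords lower-cased once per category) instead of A's file-major nested keyword scan;
-- the return values are proved equal under Pre_ (distinct category names, none named "uncategorized").

-- shared helper of both ports: both Pythons build the entry {'filename': fn, **data} verbatim
def pvEntry (fn : String) (data : List (String × String)) : List (String × String) :=
  (data.foldl (fun d p => d.insert p.1 p.2)
    (PySem.Dict.mk [("filename", fn)])).items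

-- shared helper of both ports: both Pythons form f"{data.get('message_text','').lower()} {fn.lower()}"
def pvText (fn : String) (data : List (String × String)) : String :=
  PySem.Str.lower ((PySem.Dict.mk data).getD "message_text" "") ++ " " ++ PySem.Str.lower fn

-- ===== PORT A =====
-- A's inner keyword loop with `break`: any keyword of the category occurs (lower-cased) in t
def pvM (kws : List String) (t : String) : Bool :=
  kws.any (fun k => PySem.Str.isIn (PySem.Str.lower k) t)

-- A's middle loop with `matched`/`break`: first category whose keyword list matches
def pvFirstCat : List (String × List String) → String → Option String
  | [], _ => none
  | (c, kws) :: rest, t => if pvM kws t then some c else pvFirstCat rest t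

-- A's loop body over one (filename, data) item
def pvStepA (cats : List (String × List String))
    (d : PySem.Dict String (List (List (String × String))))
    (p : String × List (String × String)) : PySem.Dict String (List (List (String × String))) :=
  let combined := pvText p.1 p.2
  match pvFirstCat cats combined with
  | some c => d.modify c [] (fun l => l ++ [pvEntry p.1 p.2])
  | none => d.modify "uncategorized" [] (fun l => l ++ [pvEntry p.1 p.2])

def categorize_files_by_keywords (metadata : List (String × List (String × String))) (categories : List (String × List String)) : List (String × List (List (String × String))) :=
  -- categorized = {cat: [] for cat in categories.keys()}; categorized['uncategorized'] = []
  let d0 : PySem.Dict String (List (List (String × String))) :=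
    categories.foldl (fun d p => d.insert p.1 []) PySem.Dict.empty
  let d1 := d0.insert "uncategorized" []
  (metadata.foldl (pvStepA categories) d1).items

-- ===== PORT B =====
-- B's entry expression {'filename': fn, **data} applied to a (fn, data, text) triple
def pvEnt3 (r : String × List (String × String) × String) : List (String × String) :=
  pvEntry r.1 r.2.1

-- B's loop body over one (category, keywords) item: split `remaining` into hits and rest
def pvStepB
    (acc : PySem.Dict String (List (List (String × String))) × List (String × List (String × String) × String))
    (p : String × List String) :
    PySem.Dict String (List (List (String × String))) × List (String × List (String × String) × String) :=
  let lowered := p.2.map PySem.Str.lower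
  (acc.1.insert p.1
      ((acc.2.filter (fun r => lowered.any (fun k => PySem.Str.isIn k r.2.2))).map pvEnt3),
   acc.2.filter (fun r => !(lowered.any (fun k => PySem.Str.isIn k r.2.2))))

def categorize_files_by_keywords_alt (metadata : List (String × List (String × String))) (categories : List (String × List String)) : List (String × List (List (String × String))) :=
  -- remaining = [(fn, data, text) …]
  let prepared : List (String × List (String × String) × String) :=
    metadata.map (fun p => (p.1, p.2, pvText p.1 p.2))
  let st := categories.foldl pvStepB (PySem.Dict.empty, prepared)
  -- result['uncategorized'] = leftovers
  (st.1.insert "uncategorized" (st.2.map pvEnt3)).items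

-- ===== PRECONDITION & SPEC =====
-- Pre_ excludes assoc lists whose category names repeat (they do not encode a Python dict) and a
-- user category literally named 'uncategorized', on which A accidentally merges that category with
-- the fallback bucket while B's final overwrite keeps only the leftovers — both corner behaviours are accidental.
def Pre_categorize_files_by_keywords (metadata : List (String × List (String × String))) (categories : List (String × List String)) : Prop :=
  (categories.map Prod.fst).Nodup ∧ "uncategorized" ∉ categories.map Prod.fst

instance (metadata : List (String × List (String × String))) (categories : List (String × List String)) : Decidable (Pre_categorize_files_by_keywords metadata categories) := by unfold Pre_categorize_files_by_keywords; infer_instance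

def pvWitness_categorize_files_by_keywords : (List (String × List (String × String))) × (List (String × List String)) :=
  ([("report.pdf", [("message_text", "Quarterly Video")]), ("x.mp3", [])],
   [("video", ["video", "mp4"]), ("audio", ["mp3"])])

def Spec_categorize_files_by_keywords (metadata : List (String × List (String × String))) (categories : List (String × List String)) (out : List (String × List (List (String × String)))) : Prop := out = categorize_files_by_keywords_alt metadata categories
instance (metadata : List (String × List (String × String))) (categories : List (String × List String)) (out : List (String × List (List (String × String)))) : Decidable (Spec_categorize_files_by_keywords metadata categories out) := by unfold Spec_categorize_files_by_keywords; infer_instance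

-- ===== CLAIM (what is proved, stated in full; the proofs are below) =====
def Claim_equal_categorize_files_by_keywords : Prop := ∀ (metadata : List (String × List (String × String))) (categories : List (String × List String)), Dom_categorize_files_by_keywords metadata categories → Pre_categorize_files_by_keywords metadata categories → Spec_categorize_files_by_keywords metadata categories (categorize_files_by_keywords metadata categories)

-- ===== LEMMAS AND PROOFS =====

-- the category name A's loop body files p under (fallback "uncategorized")
def pvAssign (cats : List (String × List String)) (t : String) : String :=
  (pvFirstCat cats t).getD "uncategorized"

-- B's recursion, written as a function of the category list and the remaining triples
def pvBspec : List (String × List String) → List (String × List (String × String) × String) →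
    List (String × List (List (String × String)))
  | [], rem => [("uncategorized", rem.map pvEnt3)]
  | (c, kws) :: rest, rem =>
      (c, (rem.filter (fun r => pvM kws r.2.2)).map pvEnt3) ::
        pvBspec rest (rem.filter (fun r => !pvM kws r.2.2))

theorem pvAssign_nil (t : String) : pvAssign [] t = "uncategorized" := rfl

theorem pvAssign_cons (c : String) (kws : List String) (rest : List (String × List String)) (t : String) :
    pvAssign ((c, kws) :: rest) t = if pvM kws t then c else pvAssign rest t := by
  simp only [pvAssign, pvFirstCat]
  split <;> simp

theorem pvAssign_mem (cats : List (String × List String)) (t : String) :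
    pvAssign cats t ∈ cats.map Prod.fst ++ ["uncategorized"] := by
  induction cats with
  | nil => simp [pvAssign_nil]
  | cons p rest ih =>
      obtain ⟨c, kws⟩ := p
      rw [pvAssign_cons]
      split
      · simp
      · simpa using Or.inr (by simpa using ih)

theorem pvStepA_eq (cats : List (String × List String)) (d : PySem.Dict String (List (List (String × String)))) (p : String × List (String × String)) :
    pvStepA cats d p
      = d.modify (pvAssign cats (pvText p.1 p.2)) [] (fun l => l ++ [pvEntry p.1 p.2]) := by
  simp only [pvStepA, pvAssign]
  cases h : pvFirstCat cats (pvText p.1 p.2) <;> simp [h]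

theorem getD_nil_of_items {d : PySem.Dict String (List (List (String × String)))}
    (h : ∀ p ∈ d.items, p.2 = ([] : List (List (String × String)))) (c : String) :
    d.getD c [] = [] := by
  cases hg : d.get? c with
  | none => exact PySem.Dict.getD_of_get?_eq_none _ _ hg
  | some v =>
      rw [PySem.Dict.getD_of_get?_eq_some _ _ hg]
      exact h _ (PySem.Dict.mem_items_of_get?_eq_some d hg)

theorem foldA_keys (cats : List (String × List String)) (l : List (String × List (String × String)))
    (d : PySem.Dict String (List (List (String × String))))
    (h : ∀ p ∈ l, pvAssign cats (pvText p.1 p.2) ∈ d.keys) :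
    (l.foldl (pvStepA cats) d).keys = d.keys := by
  induction l generalizing d with
  | nil => rfl
  | cons p l ih =>
      rw [List.foldl_cons, pvStepA_eq]
      have hc : d.contains (pvAssign cats (pvText p.1 p.2)) = true :=
        (PySem.Dict.contains_iff_mem_keys _ _).2 (h p (by simp))
      have hkeys : (d.modify (pvAssign cats (pvText p.1 p.2)) [] (fun l => l ++ [pvEntry p.1 p.2])).keys = d.keys := by
        rw [PySem.Dict.keys_modify, PySem.Dict.keys_insert_of_contains _ _ hc]
      rw [ih _ (by intro q hq; rw [hkeys]; exact h q (by simp [hq])), hkeys]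

theorem foldA_getD (cats : List (String × List String)) (l : List (String × List (String × String)))
    (d : PySem.Dict String (List (List (String × String)))) (c : String) :
    (l.foldl (pvStepA cats) d).getD c []
      = d.getD c [] ++ (l.filter (fun p => pvAssign cats (pvText p.1 p.2) == c)).map (fun p => pvEntry p.1 p.2) := by
  induction l generalizing d with
  | nil => simp
  | cons p l ih =>
      rw [List.foldl_cons, pvStepA_eq, ih, PySem.Dict.getD_modify, List.filter_cons]
      by_cases h : pvAssign cats (pvText p.1 p.2) = c
      · simp [h]
      · simp [h, Ne.symm h]

-- characterization of port A: bucket c collects (in metadata order) the files assigned to c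
theorem A_char (metadata : List (String × List (String × String))) (categories : List (String × List String))
    (hnd : (categories.map Prod.fst).Nodup) (hu : "uncategorized" ∉ categories.map Prod.fst) :
    categorize_files_by_keywords metadata categories
      = (categories.map Prod.fst ++ ["uncategorized"]).map
          (fun c => (c, (metadata.filter (fun p => pvAssign categories (pvText p.1 p.2) == c)).map
            (fun p => pvEntry p.1 p.2))) := by
  unfold categorize_files_by_keywords
  change (metadata.foldl (pvStepA categories)
    ((categories.foldl (fun d p => d.insert p.1 []) PySem.Dict.empty).insert "uncategorized" [])).items = _
  set d0 : PySem.Dict String (List (List (String × String))) :=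
    categories.foldl (fun d p => d.insert p.1 []) PySem.Dict.empty with hd0
  have hd0items : d0.items = categories.map (fun p => (p.1, ([] : List (List (String × String))))) := by
    have := PySem.Dict.items_foldl_insert_fresh categories Prod.fst
      (fun _ => ([] : List (List (String × String)))) PySem.Dict.empty
      (by intro a _; exact PySem.Dict.contains_empty _) hnd
    simpa [hd0] using this
  have hd0keys : d0.keys = categories.map Prod.fst := by
    simp only [PySem.Dict.keys, hd0items, List.map_map]; rfl
  have hd0nc : d0.contains "uncategorized" = false := by
    cases hc : d0.contains "uncategorized" with
    | false => rfl
    | true => exact absurd (by rw [← hd0keys]; exact (PySem.Dict.contains_iff_mem_keys _ _).1 hc) hu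
  set d1 := d0.insert "uncategorized" ([] : List (List (String × String))) with hd1
  have hd1items : d1.items = categories.map (fun p => (p.1, ([] : List (List (String × String))))) ++ [("uncategorized", [])] := by
    rw [hd1, PySem.Dict.items_insert_of_not_contains _ _ hd0nc, hd0items]
  have hd1keys : d1.keys = categories.map Prod.fst ++ ["uncategorized"] := by
    simp only [PySem.Dict.keys, hd1items, List.map_append, List.map_map]; rfl
  have hd1nodup : d1.keys.Nodup := by
    rw [hd1keys]
    refine List.Nodup.append hnd (List.nodup_singleton _) ?_
    intro a ha hb
    rw [List.mem_singleton] at hb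
    exact hu (hb ▸ ha)
  have hd1nil : ∀ c, d1.getD c [] = [] := by
    intro c
    refine getD_nil_of_items ?_ c
    intro p hp
    rw [hd1items] at hp
    rcases List.mem_append.1 hp with h | h
    · obtain ⟨q, _, rfl⟩ := List.mem_map.1 h; rfl
    · simp at h; rw [h]
  have hkeys : (metadata.foldl (pvStepA categories) d1).keys = d1.keys := by
    refine foldA_keys categories metadata d1 ?_
    intro p _
    rw [hd1keys]; exact pvAssign_mem categories (pvText p.1 p.2)
  rw [PySem.Dict.items_eq_map_keys _ (by rw [hkeys]; exact hd1nodup) ([] : List (List (String × String)))]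
  rw [hkeys, hd1keys]
  refine List.map_congr_left ?_
  intro c _
  rw [foldA_getD, hd1nil c, List.nil_append]

-- the port-B filter condition is pvM (keywords lower-cased once, then tested)
theorem anyl_eq (kws : List String) (t : String) :
    ((kws.map PySem.Str.lower).any fun k => PySem.Str.isIn k t) = pvM kws t := by
  simp [pvM, List.any_map, Function.comp_def, PySem.Str.toList_lower]

theorem foldB_items (cats : List (String × List String))
    (d : PySem.Dict String (List (List (String × String))))
    (rem : List (String × List (String × String) × String))
    (hfresh : ∀ c ∈ cats.map Prod.fst ++ ["uncategorized"], d.contains c = false)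
    (hnd : (cats.map Prod.fst ++ ["uncategorized"]).Nodup) :
    (((cats.foldl pvStepB (d, rem)).1.insert "uncategorized" ((cats.foldl pvStepB (d, rem)).2.map pvEnt3)).items)
      = d.items ++ pvBspec cats rem := by
  induction cats generalizing d rem with
  | nil =>
      simp only [List.foldl_nil]
      rw [PySem.Dict.items_insert_of_not_contains _ _ (hfresh _ (by simp))]
      rfl
  | cons p rest ih =>
      obtain ⟨c, kws⟩ := p
      rw [List.foldl_cons]
      have hstep : pvStepB (d, rem) (c, kws)
          = (d.insert c ((rem.filter (fun r => pvM kws r.2.2)).map pvEnt3),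
             rem.filter (fun r => !pvM kws r.2.2)) := by
        simp only [pvStepB, anyl_eq]
      rw [hstep]
      have hcd : d.contains c = false := hfresh c (by simp)
      have hfresh' : ∀ x ∈ rest.map Prod.fst ++ ["uncategorized"],
          (d.insert c ((rem.filter (fun r => pvM kws r.2.2)).map pvEnt3)).contains x = false := by
        intro x hx
        rw [PySem.Dict.contains_insert]
        have hxd : d.contains x = false := hfresh x (by
          rcases List.mem_append.1 hx with h | h
          · exact List.mem_append.2 (Or.inl (by simp [h]))
          · exact List.mem_append.2 (Or.inr h))
        have hcnot : c ∉ rest.map Prod.fst ++ ["uncategorized"] := by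
          simp only [List.map_cons, List.cons_append, List.nodup_cons] at hnd
          exact hnd.1
        have hxc : x ≠ c := fun hxe => hcnot (hxe ▸ hx)
        simp [hxd, hxc]
      have hnd' : (rest.map Prod.fst ++ ["uncategorized"]).Nodup := by
        simp only [List.map_cons, List.cons_append, List.nodup_cons] at hnd
        exact hnd.2
      rw [ih _ _ hfresh' hnd']
      rw [PySem.Dict.items_insert_of_not_contains _ _ hcd]
      simp [pvBspec]
  
theorem bridge (cats : List (String × List String))
    (hnd : (cats.map Prod.fst).Nodup) (hu : "uncategorized" ∉ cats.map Prod.fst)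
    (rem : List (String × List (String × String) × String)) :
    pvBspec cats rem
      = (cats.map Prod.fst ++ ["uncategorized"]).map
          (fun c => (c, (rem.filter (fun r => pvAssign cats r.2.2 == c)).map pvEnt3)) := by
  induction cats generalizing rem with
  | nil => simp [pvBspec, pvAssign_nil]
  | cons p rest ih =>
      obtain ⟨c, kws⟩ := p
      have hcons : c ∉ rest.map Prod.fst ∧ (rest.map Prod.fst).Nodup := by
        rw [List.map_cons] at hnd
        exact List.nodup_cons.1 hnd
      have hcnotrest : c ∉ rest.map Prod.fst := hcons.1
      have hndr : (rest.map Prod.fst).Nodup := hcons.2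
      have hcu : c ≠ "uncategorized" := fun h => hu (by simp [h])
      have hur : "uncategorized" ∉ rest.map Prod.fst := fun h => hu (by simp [h])
      simp only [pvBspec, List.map_cons, List.cons_append]
      congr 1
      · have hf : rem.filter (fun r => pvAssign ((c, kws) :: rest) r.2.2 == c)
            = rem.filter (fun r => pvM kws r.2.2) := by
          apply List.filter_congr
          intro r _
          rw [pvAssign_cons]
          by_cases h : pvM kws r.2.2
          · simp [h]
          · have hne : pvAssign rest r.2.2 ≠ c := by
              intro he
              rcases List.mem_append.1 (he ▸ pvAssign_mem rest r.2.2) with hh | hh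
              · exact hcnotrest hh
              · exact hcu (List.mem_singleton.1 hh)
            simp [h, hne]
        rw [hf]
      · rw [ih hndr hur]
        apply List.map_congr_left
        intro c' hc'
        have hc'ne : c' ≠ c := by
          intro he
          subst he
          rcases List.mem_append.1 hc' with hh | hh
          · exact hcnotrest hh
          · exact hcu (List.mem_singleton.1 hh)
        congr 1
        rw [List.filter_filter]
        congr 1
        apply List.filter_congr
        intro r _
        rw [pvAssign_cons]
        by_cases h : pvM kws r.2.2 <;> simp [h, Ne.symm hc'ne]

theorem B_char (metadata : List (String × List (String × String))) (categories : List (String × List String))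
    (hnames : (categories.map Prod.fst ++ ["uncategorized"]).Nodup) :
    categorize_files_by_keywords_alt metadata categories
      = pvBspec categories (metadata.map (fun p => (p.1, p.2, pvText p.1 p.2))) := by
  unfold categorize_files_by_keywords_alt
  have h := foldB_items categories PySem.Dict.empty
    (metadata.map (fun p => (p.1, p.2, pvText p.1 p.2)))
    (fun c _ => PySem.Dict.contains_empty c) hnames
  simpa using h

-- ===== VERDICT (by name: the statement is the Claim_ definition above) =====
theorem categorize_files_by_keywords_spec : Claim_equal_categorize_files_by_keywords := by
  intro metadata categories _hdom hpre
  obtain ⟨hnd, hu⟩ := hpre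
  have hnames : (categories.map Prod.fst ++ ["uncategorized"]).Nodup := by
    refine List.Nodup.append hnd (List.nodup_singleton _) ?_
    intro a ha hb
    rw [List.mem_singleton] at hb
    exact hu (hb ▸ ha)
  unfold Spec_categorize_files_by_keywords
  rw [A_char metadata categories hnd hu, B_char metadata categories hnames,
    bridge categories hnd hu]
  apply List.map_congr_left
  intro c _
  congr 1
  rw [List.filter_map, List.map_map]
  rfl
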